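-- pv_equiv track=rewrite | github.com/ethanibennett/wsop-2026-scheduler | scripts/extract-wsop-structure-pages.py | emit_js
-- ===== SOURCE A (Python) =====
-- def emit_js(mapping: dict[int, int]) -> str:
--     keys = sorted(mapping.keys())
--     rows = []
--     for start in range(0, len(keys), 10):
--         chunk = keys[start : start + 10]
--         parts = [f"{n}: {mapping[n]}" for n in chunk]
--         rows.append("  " + ", ".join(parts) + ",")
--     if rows:
--         rows[-1] = rows[-1].rstrip(",")
--     return "{\n" + "\n".join(rows) + "\n}"
-- ===== SOURCE B (Python) =====
-- def emit_js(mapping: dict[int, int]) -> str: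
--     keys = sorted(mapping)
--     pieces = []
--     for i, n in enumerate(keys):
--         if i == 0:
--             sep = "  "
--         elif i % 10 == 0:
--             sep = ",\n  "
--         else:
--             sep = ", "
--         pieces.append(sep + f"{n}: {mapping[n]}")
--     return "{\n" + "".join(pieces) + "\n}"
-- ===== Notes on version B (the rewrite author's own statement) =====
-- stated objective: alternative
-- what changed: B drops A's chunk-into-rows-of-10 pass and the trailing-comma rstrip fix-up: it makes a single pass over the enumerated sorted keys, choosing each entry's leading separator (' ', ',\n ' every 10th, ', ' otherwise) by index, so the body is one flat concatenation with no post-editing of the last row.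
import Mathlib
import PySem

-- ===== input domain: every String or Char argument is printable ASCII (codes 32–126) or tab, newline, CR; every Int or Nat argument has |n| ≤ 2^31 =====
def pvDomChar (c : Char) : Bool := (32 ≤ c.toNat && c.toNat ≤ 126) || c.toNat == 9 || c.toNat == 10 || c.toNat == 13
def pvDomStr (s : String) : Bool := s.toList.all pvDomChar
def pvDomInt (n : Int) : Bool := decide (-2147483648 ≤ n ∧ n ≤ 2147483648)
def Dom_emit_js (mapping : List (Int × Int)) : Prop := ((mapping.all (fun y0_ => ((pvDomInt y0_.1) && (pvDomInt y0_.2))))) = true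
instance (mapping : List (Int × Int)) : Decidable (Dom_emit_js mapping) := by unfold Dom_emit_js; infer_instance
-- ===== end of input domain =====

-- B replaces A's chunk-into-rows-of-10 pass plus trailing-comma rstrip fix-up by one flat pass over
-- the enumerated sorted keys that picks each entry's leading separator by index (objective: alternative).

-- ===== PORT A =====
-- hand port of Python's s.rstrip(","): drop trailing ',' characters from the right; exact.
def pvRstripComma (s : String) : String :=
  String.ofList ((s.toList.reverse.dropWhile (fun c => c == ',')).reverse)

def emit_js (mapping : List (Int × Int)) : String :=
  let d : PySem.Dict Int Int := PySem.Dict.ofList mapping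
  let keys : List Int := PySem.List.sorted d.keys (fun n => n) false
  let rows : List String :=
    (PySem.List.pyRange 0 (PySem.List.len keys) 10).foldl
      (fun rows start =>
        let chunk := PySem.List.slice keys (some start) (some (start + 10))
        let parts := chunk.map (fun n => PySem.Int.toStr n ++ ": " ++ PySem.Int.toStr (d.getD n 0))
        rows ++ ["  " ++ PySem.Str.join ", " parts ++ ","]) []
  let rows' : List String :=
    if rows ≠ [] then rows.dropLast ++ [pvRstripComma (rows.getLast?.getD "")] else rows
  "{\n" ++ PySem.Str.join "\n" rows' ++ "\n}"

-- ===== PORT B =====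
def emit_js_alt (mapping : List (Int × Int)) : String :=
  let d : PySem.Dict Int Int := PySem.Dict.ofList mapping
  let keys : List Int := PySem.List.sorted d.keys (fun n => n) false
  let pieces : List String :=
    (PySem.List.enumerate keys 0).foldl
      (fun pieces p =>
        let sep : String :=
          if p.1 = 0 then "  " else if PySem.Int.mod p.1 10 = 0 then ",\n  " else ", "
        pieces ++ [sep ++ PySem.Int.toStr p.2 ++ ": " ++ PySem.Int.toStr (d.getD p.2 0)]) []
  "{\n" ++ PySem.Str.join "" pieces ++ "\n}"

-- ===== PRECONDITION & SPEC =====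
def Spec_emit_js (mapping : List (Int × Int)) (out : String) : Prop := out = emit_js_alt mapping
instance (mapping : List (Int × Int)) (out : String) : Decidable (Spec_emit_js mapping out) := by unfold Spec_emit_js; infer_instance

-- ===== CLAIM (what is proved, stated in full; the proofs are below) =====
def Claim_equal_emit_js : Prop := ∀ (mapping : List (Int × Int)), Dom_emit_js mapping → Spec_emit_js mapping (emit_js mapping)

-- ===== LEMMAS AND PROOFS =====

-- chunks of ten, as A's range(0, len, 10) slicing produces them
def pvChunks10 {α : Type} (l : List α) : List (List α) :=
  if h : l = [] then [] else l.take 10 :: pvChunks10 (l.drop 10)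
termination_by l.length
decreasing_by
  simp only [List.length_drop]
  have := List.length_pos_of_ne_nil h
  omega

theorem pvChunks10_nil {α : Type} : pvChunks10 ([] : List α) = [] := by
  rw [pvChunks10]; simp

theorem pvChunks10_cons {α : Type} (l : List α) (h : l ≠ []) :
    pvChunks10 l = l.take 10 :: pvChunks10 (l.drop 10) := by
  rw [pvChunks10]; simp [h]

-- char-level mirrors of the two body builders
def pvRstripC (cs : List Char) : List Char := (cs.reverse.dropWhile (fun c => c == ',')).reverse

def pvFixLastC : List (List Char) → List (List Char)
  | [] => []
  | [r] => [pvRstripC r]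
  | r :: s :: rest => r :: pvFixLastC (s :: rest)

def pvFixLast : List String → List String
  | [] => []
  | [r] => [pvRstripComma r]
  | r :: s :: rest => r :: pvFixLast (s :: rest)

def pvRowC (E : Int → List Char) (c : List Int) : List Char :=
  "  ".toList ++ PySem.Chars.join ", ".toList (c.map E) ++ [',']

def pvPieceC (E : Int → List Char) (p : ℤ × Int) : List Char :=
  (if p.1 = 0 then "  ".toList
   else if PySem.Int.mod p.1 10 = 0 then ",\n  ".toList else ", ".toList) ++ E p.2

def pvBodyB (E : Int → List Char) (ks : List Int) (s : ℤ) : List Char :=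
  ((PySem.List.enumerate ks s).map (pvPieceC E)).flatten

def pvBodyA (E : Int → List Char) (ks : List Int) : List Char :=
  PySem.Chars.join ['\n'] (pvFixLastC ((pvChunks10 ks).map (pvRowC E)))

def pvGoodE (E : Int → List Char) : Prop :=
  ∀ n : Int, E n ≠ [] ∧ (E n).getLast? ≠ some ','

theorem pv_mod10 (s : ℤ) : PySem.Int.mod s 10 = s % 10 := by
  unfold PySem.Int.mod
  rw [Int.fmod_eq_emod, if_pos (Or.inl (by norm_num))]
  ring

theorem pv_enum_cons {α : Type} (x : α) (xs : List α) (s : ℤ) :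
    PySem.List.enumerate (x :: xs) s = (s, x) :: PySem.List.enumerate xs (s + 1) := rfl

theorem pv_getLast?_append_right {α : Type} (l l' : List α) (h : l' ≠ []) :
    (l ++ l').getLast? = l'.getLast? := by
  rw [List.getLast?_append]
  cases hx : l'.getLast? with
  | none => exact absurd (List.getLast?_eq_none_iff.mp hx) h
  | some a => rfl

-- ---- digit-string facts ----
set_option maxHeartbeats 1000000 in
theorem pv_digitChar_ne_comma (n : ℕ) : Nat.digitChar n ≠ ',' := by
  by_cases h : n < 16
  · interval_cases n <;> decide
  · have hstar : Nat.digitChar n = '*' := by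
      unfold Nat.digitChar
      rw [if_neg (show ¬n = 0 by omega), if_neg (show ¬n = 1 by omega), if_neg (show ¬n = 2 by omega), if_neg (show ¬n = 3 by omega), if_neg (show ¬n = 4 by omega), if_neg (show ¬n = 5 by omega), if_neg (show ¬n = 6 by omega), if_neg (show ¬n = 7 by omega), if_neg (show ¬n = 8 by omega), if_neg (show ¬n = 9 by omega), if_neg (show ¬n = 10 by omega), if_neg (show ¬n = 11 by omega), if_neg (show ¬n = 12 by omega), if_neg (show ¬n = 13 by omega), if_neg (show ¬n = 14 by omega), if_neg (show ¬n = 15 by omega)]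
    rw [hstar]
    decide

theorem pv_toDigitsCore_length (b : ℕ) :
    ∀ (f n : ℕ) (ds : List Char), ds.length ≤ (Nat.toDigitsCore b f n ds).length := by
  intro f
  induction f with
  | zero => intro n ds; rw [Nat.toDigitsCore.eq_1]
  | succ f ih =>
    intro n ds
    rw [Nat.toDigitsCore.eq_2]
    split
    · simp
    · exact le_trans (by simp) (ih (n / b) (Nat.digitChar (n % b) :: ds))

theorem pv_mem_toDigitsCore (b : ℕ) :
    ∀ (f n : ℕ) (ds : List Char) (c : Char),
      c ∈ Nat.toDigitsCore b f n ds → c ∈ ds ∨ ∃ k, c = Nat.digitChar k := by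
  intro f
  induction f with
  | zero => intro n ds c hc; rw [Nat.toDigitsCore.eq_1] at hc; exact Or.inl hc
  | succ f ih =>
    intro n ds c hc
    rw [Nat.toDigitsCore.eq_2] at hc
    split at hc
    · rcases List.mem_cons.mp hc with h | h
      · exact Or.inr ⟨n % b, h⟩
      · exact Or.inl h
    · rcases ih (n / b) (Nat.digitChar (n % b) :: ds) c hc with h | h
      · rcases List.mem_cons.mp h with h' | h'
        · exact Or.inr ⟨n % b, h'⟩
        · exact Or.inl h'
      · exact Or.inr h

theorem pv_toDigits_ne_nil (n : ℕ) : Nat.toDigits 10 n ≠ [] := by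
  unfold Nat.toDigits
  rw [Nat.toDigitsCore.eq_2]
  split
  · simp
  · intro h
    have := pv_toDigitsCore_length 10 n (n / 10) [Nat.digitChar (n % 10)]
    rw [h] at this
    simp at this

theorem pv_toDigits_getLast (n : ℕ) : (Nat.toDigits 10 n).getLast? ≠ some ',' := by
  intro h
  have hc : ',' ∈ Nat.toDigits 10 n := List.mem_of_getLast? h
  rcases pv_mem_toDigitsCore 10 (n + 1) n [] ',' hc with h' | ⟨k, hk⟩
  · simp at h'
  · exact pv_digitChar_ne_comma k hk.symm

theorem pv_toChars_ne_nil (n : ℤ) : PySem.Int.toChars n ≠ [] := by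
  unfold PySem.Int.toChars
  split_ifs
  · simp
  · exact pv_toDigits_ne_nil _

theorem pv_toChars_getLast (n : ℤ) : (PySem.Int.toChars n).getLast? ≠ some ',' := by
  unfold PySem.Int.toChars
  split_ifs
  · rw [show ('-' :: Nat.toDigits 10 n.natAbs) = ['-'] ++ Nat.toDigits 10 n.natAbs from rfl,
      pv_getLast?_append_right _ _ (pv_toDigits_ne_nil _)]
    exact pv_toDigits_getLast _
  · exact pv_toDigits_getLast _

-- ---- rstrip ----
theorem pv_rstripC_append (cs : List Char) (h : cs.getLast? ≠ some ',') :
    pvRstripC (cs ++ [',']) = cs := by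
  unfold pvRstripC
  rw [List.reverse_append]
  simp only [List.reverse_cons, List.reverse_nil, List.nil_append, List.singleton_append,
    List.dropWhile_cons]
  norm_num
  cases hrev : cs.reverse with
  | nil => simp [List.reverse_eq_nil_iff.mp hrev]
  | cons hd tl =>
    have hhd : (hd == ',') = false := by
      apply beq_false_of_ne
      intro h'
      apply h
      rw [← List.head?_reverse, hrev, h']
      rfl
    rw [List.dropWhile_cons, hhd]
    simp [← hrev]

-- ---- join lemmas ----
theorem pv_join_cons_flat (sep p : List Char) (ps : List (List Char)) :
    PySem.Chars.join sep (p :: ps) = p ++ (ps.map (fun q => sep ++ q)).flatten := by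
  induction ps generalizing p with
  | nil => simp [PySem.Chars.join_singleton]
  | cons q rest ih =>
    rw [PySem.Chars.join_cons_cons, ih q]
    simp

theorem pv_join_ne_nil (sep : List Char) (ls : List (List Char)) (h : ls ≠ [])
    (hne : ∀ l ∈ ls, l ≠ []) : PySem.Chars.join sep ls ≠ [] := by
  cases ls with
  | nil => exact absurd rfl h
  | cons p ps =>
    rw [pv_join_cons_flat]
    simp only [ne_eq, List.append_eq_nil_iff, not_and]
    intro hp
    exact absurd hp (hne p (by simp))

theorem pv_join_nil_flatten (ls : List (List Char)) : PySem.Chars.join [] ls = ls.flatten := by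
  cases ls with
  | nil => simp [PySem.Chars.join_nil]
  | cons p ps =>
    rw [pv_join_cons_flat]
    simp

theorem pv_join_cons_ne (sep p : List Char) (ls : List (List Char)) (h : ls ≠ []) :
    PySem.Chars.join sep (p :: ls) = p ++ sep ++ PySem.Chars.join sep ls := by
  cases ls with
  | nil => exact absurd rfl h
  | cons q rest => exact PySem.Chars.join_cons_cons _ _ _ _

theorem pv_getLast?_join (sep : List Char) :
    ∀ (ls : List (List Char)), ls ≠ [] → (∀ l ∈ ls, l ≠ []) →
      ∃ l ∈ ls, (PySem.Chars.join sep ls).getLast? = l.getLast? := by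
  intro ls
  induction ls with
  | nil => intro h; exact absurd rfl h
  | cons p ps ih =>
    intro _ hne
    cases ps with
    | nil => exact ⟨p, by simp, by rw [PySem.Chars.join_singleton]⟩
    | cons q rest =>
      have hne' : ∀ l ∈ q :: rest, l ≠ [] := fun l hl => hne l (by simp [hl])
      obtain ⟨l, hl, heq⟩ := ih (by simp) hne'
      have hj : PySem.Chars.join sep (q :: rest) ≠ [] :=
        pv_join_ne_nil sep (q :: rest) (by simp) hne'
      exact ⟨l, List.mem_cons_of_mem p hl, by
        rw [PySem.Chars.join_cons_cons, pv_getLast?_append_right _ _ hj, heq]⟩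

-- ---- fixLast helpers ----
theorem pv_fixLastC_cons (r : List Char) (ls : List (List Char)) (h : ls ≠ []) :
    pvFixLastC (r :: ls) = r :: pvFixLastC ls := by
  cases ls with
  | nil => exact absurd rfl h
  | cons s rest => rfl

theorem pv_fixLastC_ne_nil (ls : List (List Char)) (h : ls ≠ []) : pvFixLastC ls ≠ [] := by
  cases ls with
  | nil => exact absurd rfl h
  | cons r rest =>
    cases rest with
    | nil => simp [pvFixLastC]
    | cons s rest' => rw [pv_fixLastC_cons _ _ (by simp)]; simp

theorem pv_dropLast_eq_fixLast :
    ∀ (rows : List String), rows ≠ [] →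
      rows.dropLast ++ [pvRstripComma (rows.getLast?.getD "")] = pvFixLast rows := by
  intro rows
  induction rows with
  | nil => intro h; exact absurd rfl h
  | cons r rs ih =>
    intro _
    cases rs with
    | nil => simp [pvFixLast]
    | cons s rest =>
      have := ih (by simp)
      simp only [List.dropLast_cons_of_ne_nil (by simp : s :: rest ≠ ([] : List String)),
        List.getLast?_cons_cons]
      rw [List.cons_append, this]
      rfl

theorem pv_map_toList_fixLast :
    ∀ (rows : List String),
      (pvFixLast rows).map String.toList = pvFixLastC (rows.map String.toList) := by
  intro rows
  induction rows with
  | nil => rfl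
  | cons r rs ih =>
    cases rs with
    | nil =>
      simp [pvFixLast, pvFixLastC, pvRstripComma, pvRstripC]
    | cons s rest =>
      rw [show pvFixLast (r :: s :: rest) = r :: pvFixLast (s :: rest) from rfl]
      simp only [List.map_cons] at *
      rw [pv_fixLastC_cons _ _ (by simp), ← ih]

-- ---- pyRange with step 10 ----
theorem pv_pyRange_ten_nil (a b : ℤ) (h : b ≤ a) : PySem.List.pyRange a b 10 = [] := by
  rw [PySem.List.pyRange_of_pos a b (by norm_num)]
  simp [show ¬a < b by omega]

theorem pv_pyRange_ten_cons (a b : ℤ) (h : a < b) :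
    PySem.List.pyRange a b 10 = a :: PySem.List.pyRange (a + 10) b 10 := by
  rw [PySem.List.pyRange_of_pos a b (by norm_num),
    PySem.List.pyRange_of_pos (a + 10) b (by norm_num)]
  have hn : ((b - a + 10 - 1) / 10).toNat
      = (if a + 10 < b then ((b - (a + 10) + 10 - 1) / 10).toNat else 0) + 1 := by
    split_ifs <;> omega
  rw [if_pos h, hn, List.range_succ_eq_map]
  simp only [List.map_cons, List.map_map, Nat.cast_zero, mul_zero, add_zero]
  congr 1
  apply List.map_congr_left
  intro k _
  simp only [Function.comp_apply, Nat.succ_eq_add_one]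
  push_cast
  ring

-- chunk decomposition of A's row loop
theorem pv_chunkMap (g : List Int → String) (keys : List Int) :
    ∀ (n a : ℕ), keys.length ≤ a + n →
      (PySem.List.pyRange (a : ℤ) (keys.length : ℤ) 10).map
          (fun start => g (PySem.List.slice keys (some start) (some (start + 10))))
        = (pvChunks10 (keys.drop a)).map g := by
  intro n
  induction n with
  | zero =>
    intro a ha
    rw [pv_pyRange_ten_nil _ _ (by exact_mod_cast by omega)]
    rw [List.drop_eq_nil_of_le (by omega), pvChunks10_nil]
    rfl
  | succ n ih =>
    intro a ha
    by_cases hab : keys.length ≤ a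
    · rw [pv_pyRange_ten_nil _ _ (by exact_mod_cast hab)]
      rw [List.drop_eq_nil_of_le hab, pvChunks10_nil]
      rfl
    · have hab' : a < keys.length := by omega
      rw [pv_pyRange_ten_cons _ _ (by exact_mod_cast hab'), List.map_cons]
      have hcast : ((a : ℤ) + 10) = ((a + 10 : ℕ) : ℤ) := by push_cast; ring
      have hslice : PySem.List.slice keys (some (a : ℤ)) (some ((a : ℤ) + 10))
          = (keys.drop a).take 10 := by
        rw [hcast, PySem.List.slice_natCast]
        congr 1
        omega
      have hne : keys.drop a ≠ [] := by
        intro hdrop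
        exact absurd (List.drop_eq_nil_iff.mp hdrop) (by omega)
      rw [pvChunks10_cons _ hne, List.map_cons, hslice]
      congr 1
      rw [List.drop_drop, hcast]
      exact ih (a + 10) (by omega)

theorem pv_chunkMap0 (g : List Int → String) (keys : List Int) :
    (PySem.List.pyRange 0 (keys.length : ℤ) 10).map
        (fun start => g (PySem.List.slice keys (some start) (some (start + 10))))
      = (pvChunks10 keys).map g := by
  have := pv_chunkMap g keys keys.length 0 (by omega)
  simpa using this

-- ---- B-side body lemmas ----
theorem pv_shiftinv (E : Int → List Char) :
    ∀ (ks : List Int) (s t : ℤ), 0 < s → 0 < t → s % 10 = t % 10 →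
      pvBodyB E ks s = pvBodyB E ks t := by
  intro ks
  induction ks with
  | nil => intro s t _ _ _; rfl
  | cons x xs ih =>
    intro s t hs ht hmod
    unfold pvBodyB
    rw [pv_enum_cons, pv_enum_cons, List.map_cons, List.map_cons, List.flatten_cons,
      List.flatten_cons]
    have h1 : pvPieceC E (s, x) = pvPieceC E (t, x) := by
      unfold pvPieceC
      simp only [pv_mod10]
      rw [if_neg (show ¬s = 0 by omega), if_neg (show ¬t = 0 by omega), hmod]
    have h2 := ih (s + 1) (t + 1) (by omega) (by omega) (by omega)
    unfold pvBodyB at h2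
    rw [h1, h2]
    
theorem pv_chunk_small (E : Int → List Char) :
    ∀ (c : List Int) (s : ℤ), 0 < s → s + c.length ≤ 10 →
      pvBodyB E c s = (c.map (fun k => ", ".toList ++ E k)).flatten := by
  intro c
  induction c with
  | nil => intro s _ _; rfl
  | cons x xs ih =>
    intro s hs hlen
    simp only [List.length_cons] at hlen
    unfold pvBodyB
    rw [pv_enum_cons, List.map_cons, List.flatten_cons]
    have hp : pvPieceC E (s, x) = ", ".toList ++ E x := by
      unfold pvPieceC
      simp only [pv_mod10]
      rw [if_neg (show ¬s = 0 by omega), if_neg (show ¬s % 10 = 0 by push_cast at hlen; omega)]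
    have ht := ih (s + 1) (by omega) (by push_cast at hlen ⊢; omega)
    unfold pvBodyB at ht
    rw [hp, List.map_cons, List.flatten_cons, ht]

theorem pv_first (E : Int → List Char) (c : List Int) (h : c ≠ []) (hlen : c.length ≤ 10) :
    pvBodyB E c 0 = "  ".toList ++ PySem.Chars.join ", ".toList (c.map E) := by
  cases c with
  | nil => exact absurd rfl h
  | cons x xs =>
    simp only [List.length_cons] at hlen
    unfold pvBodyB
    rw [pv_enum_cons, List.map_cons, List.flatten_cons]
    have hp : pvPieceC E ((0 : ℤ), x) = "  ".toList ++ E x := by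
      unfold pvPieceC
      rw [if_pos rfl]
    have ht := pv_chunk_small E xs 1 (by norm_num) (by omega)
    unfold pvBodyB at ht
    rw [hp, show (0 : ℤ) + 1 = 1 from rfl, ht]
    rw [List.map_cons, pv_join_cons_flat, List.map_map]
    rw [show ((fun q => ", ".toList ++ q) ∘ E) = (fun k => ", ".toList ++ E k) from rfl]
    rw [List.append_assoc]

theorem pv_shift10 (E : Int → List Char) (ks : List Int) (h : ks ≠ []) :
    pvBodyB E ks 10 = ",\n".toList ++ pvBodyB E ks 0 := by
  cases ks with
  | nil => exact absurd rfl h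
  | cons y ys =>
    unfold pvBodyB
    rw [pv_enum_cons, pv_enum_cons, List.map_cons, List.map_cons, List.flatten_cons,
      List.flatten_cons]
    have h10 : pvPieceC E ((10 : ℤ), y) = ",\n  ".toList ++ E y := by
      unfold pvPieceC
      simp only [pv_mod10]
      rw [if_neg (show ¬(10 : ℤ) = 0 by omega), if_pos (show (10 : ℤ) % 10 = 0 by decide)]
    have h0 : pvPieceC E ((0 : ℤ), y) = "  ".toList ++ E y := by
      unfold pvPieceC
      rw [if_pos rfl]
    have hsh := pv_shiftinv E ys 11 1 (by omega) (by omega) (by omega)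
    unfold pvBodyB at hsh
    rw [h10, h0, show (10 : ℤ) + 1 = 11 from rfl, show (0 : ℤ) + 1 = 1 from rfl, hsh]
    rw [show ",\n  ".toList = ",\n".toList ++ "  ".toList from rfl]
    simp

-- ---- the main body equality ----
theorem pv_main (E : Int → List Char) (hE : pvGoodE E) :
    ∀ (n : ℕ) (ks : List Int), ks.length ≤ n → pvBodyB E ks 0 = pvBodyA E ks := by
  intro n
  induction n with
  | zero =>
    intro ks hlen
    have : ks = [] := List.length_eq_zero_iff.mp (by omega)
    subst this
    simp [pvBodyB, pvBodyA, pvChunks10_nil, pvFixLastC, PySem.Chars.join_nil]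
  | succ n ih =>
    intro ks hlen
    by_cases hks : ks = []
    · subst hks
      simp [pvBodyB, pvBodyA, pvChunks10_nil, pvFixLastC, PySem.Chars.join_nil]
    · have hsplit : ks.take 10 ++ ks.drop 10 = ks := List.take_append_drop 10 ks
      have hcne : ks.take 10 ≠ [] := by
        intro hnil
        rcases List.take_eq_nil_iff.mp hnil with h | h
        · omega
        · exact hks h
      have hEne : ∀ l ∈ (ks.take 10).map E, l ≠ [] := by
        intro l hl
        obtain ⟨k, _, hk⟩ := List.mem_map.mp hl
        exact hk ▸ (hE k).1
      have hmapne : (ks.take 10).map E ≠ [] := by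
        simpa using hcne
      have hclen : (ks.take 10).length ≤ 10 := by
        simp [List.length_take]
      by_cases hr : ks.drop 10 = []
      · -- a single chunk: the last (only) row loses its trailing comma
        have hchunks : pvChunks10 ks = [ks.take 10] := by
          rw [pvChunks10_cons ks hks, hr, pvChunks10_nil]
        have hbodyA : pvBodyA E ks
            = pvRstripC (pvRowC E (ks.take 10)) := by
          unfold pvBodyA
          rw [hchunks]
          simp [pvFixLastC, PySem.Chars.join_singleton]
        rw [hbodyA]
        have hJne : PySem.Chars.join ", ".toList ((ks.take 10).map E) ≠ [] :=
          pv_join_ne_nil _ _ hmapne hEne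
        have hlast : ("  ".toList ++ PySem.Chars.join ", ".toList ((ks.take 10).map E)).getLast?
            ≠ some ',' := by
          rw [pv_getLast?_append_right _ _ hJne]
          obtain ⟨l, hl, heq⟩ := pv_getLast?_join ", ".toList ((ks.take 10).map E) hmapne hEne
          rw [heq]
          obtain ⟨k, _, hk⟩ := List.mem_map.mp hl
          exact hk ▸ (hE k).2
        have hrow : pvRowC E (ks.take 10)
            = ("  ".toList ++ PySem.Chars.join ", ".toList ((ks.take 10).map E)) ++ [','] := by
          unfold pvRowC
          simp
        have hk10 : ks.take 10 = ks := by
          conv_rhs => rw [← hsplit]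
          rw [hr, List.append_nil]
        rw [hrow, pv_rstripC_append _ hlast, hk10]
        exact pv_first E ks hks (List.drop_eq_nil_iff.mp hr)
      · -- at least two chunks
        have hlen10 : ¬ ks.length ≤ 10 := fun hle => hr (List.drop_eq_nil_of_le hle)
        have h10 : (ks.take 10).length = 10 := by
          simp [List.length_take]
          omega
        have hmapchunk : (pvChunks10 (ks.drop 10)).map (pvRowC E) ≠ [] := by
          rw [pvChunks10_cons _ hr]
          simp
        have hbA : pvBodyA E ks
            = pvRowC E (ks.take 10) ++ '\n' :: pvBodyA E (ks.drop 10) := by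
          unfold pvBodyA
          rw [pvChunks10_cons ks hks, List.map_cons,
            pv_fixLastC_cons _ _ hmapchunk,
            pv_join_cons_ne _ _ _ (pv_fixLastC_ne_nil _ hmapchunk)]
          simp [List.append_assoc]
        have hbB : pvBodyB E ks 0 = pvBodyB E (ks.take 10) 0 ++ pvBodyB E (ks.drop 10) 10 := by
          conv_lhs => rw [← hsplit]
          unfold pvBodyB
          rw [PySem.List.enumerate_append, h10, List.map_append, List.flatten_append]
          norm_num
        have hih : pvBodyB E (ks.drop 10) 0 = pvBodyA E (ks.drop 10) := by
          apply ih
          simp only [List.length_drop]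
          omega
        rw [hbA, hbB, pv_shift10 E _ hr, pv_first E _ hcne hclen, hih]
        rw [show ",\n".toList = [',', '\n'] from rfl]
        simp [pvRowC, List.append_assoc]

-- the entry strings of A/B contain no trailing comma
theorem pv_goodE (d : PySem.Dict Int Int) :
    pvGoodE (fun n =>
      (PySem.Int.toStr n ++ ": " ++ PySem.Int.toStr (d.getD n 0)).toList) := by
  intro n
  constructor
  · simp only [String.toList_append, PySem.Int.toList_toStr]
    intro h
    exact pv_toChars_ne_nil _ ((List.append_eq_nil_iff.mp h).2)
  · simp only [String.toList_append, PySem.Int.toList_toStr]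
    rw [pv_getLast?_append_right _ _ (pv_toChars_ne_nil _)]
    exact pv_toChars_getLast _

-- String-level to char-level bridges
theorem pv_rowS_toList (d : PySem.Dict Int Int) (c : List Int) :
    ("  " ++ PySem.Str.join ", "
        (c.map (fun n => PySem.Int.toStr n ++ ": " ++ PySem.Int.toStr (d.getD n 0))) ++ ",").toList
      = pvRowC (fun n =>
          (PySem.Int.toStr n ++ ": " ++ PySem.Int.toStr (d.getD n 0)).toList) c := by
  have hmap : List.map (String.toList ∘ fun n =>
        PySem.Int.toStr n ++ ": " ++ PySem.Int.toStr (d.getD n 0)) c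
      = List.map (fun n =>
          (PySem.Int.toStr n ++ ": " ++ PySem.Int.toStr (d.getD n 0)).toList) c :=
    List.map_congr_left (fun n _ => rfl)
  unfold pvRowC
  simp [String.toList_append, PySem.Str.toList_join, List.map_map, hmap, List.append_assoc]

theorem pv_pieceS_toList (d : PySem.Dict Int Int) (p : ℤ × Int) :
    ((if p.1 = 0 then "  " else if PySem.Int.mod p.1 10 = 0 then ",\n  " else ", ")
        ++ PySem.Int.toStr p.2 ++ ": " ++ PySem.Int.toStr (d.getD p.2 0)).toList
      = pvPieceC (fun n =>
          (PySem.Int.toStr n ++ ": " ++ PySem.Int.toStr (d.getD n 0)).toList) p := by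
  unfold pvPieceC
  split_ifs <;> simp [String.toList_append]

-- ===== VERDICT (by name: the statement is the Claim_ definition above) =====
theorem emit_js_spec : Claim_equal_emit_js := by
  unfold Claim_equal_emit_js
  intro mapping _
  unfold Spec_emit_js
  apply String.ext
  simp only [emit_js, emit_js_alt, PySem.List.len_eq,
    PySem.List.foldl_append_singleton_eq_map, List.nil_append]
  set d : PySem.Dict Int Int := PySem.Dict.ofList mapping with hd
  set keys : List Int := PySem.List.sorted d.keys (fun n => n) false with hk
  rw [pv_chunkMap0 (fun chunk => "  " ++ PySem.Str.join ", "
      (List.map (fun n => PySem.Int.toStr n ++ ": " ++ PySem.Int.toStr (d.getD n 0)) chunk) ++ ",") keys]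
  by_cases hkeys : keys = []
  · rw [hkeys]
    simp [pvChunks10_nil, PySem.Str.toList_join, PySem.Chars.join_nil]
  · have hrows : (pvChunks10 keys).map (fun chunk => "  " ++ PySem.Str.join ", "
        (List.map (fun n => PySem.Int.toStr n ++ ": " ++ PySem.Int.toStr (d.getD n 0)) chunk) ++ ",") ≠ [] := by
      rw [pvChunks10_cons keys hkeys]
      simp
    rw [if_pos hrows, pv_dropLast_eq_fixLast _ hrows]
    simp only [String.toList_append, PySem.Str.toList_join, pv_map_toList_fixLast, List.map_map]
    rw [show (String.toList ∘ fun chunk => "  " ++ PySem.Str.join ", "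
        (List.map (fun n => PySem.Int.toStr n ++ ": " ++ PySem.Int.toStr (d.getD n 0)) chunk) ++ ",")
        = pvRowC (fun n => (PySem.Int.toStr n ++ ": " ++ PySem.Int.toStr (d.getD n 0)).toList)
      from funext fun c => pv_rowS_toList d c]
    rw [show (String.toList ∘ fun p : ℤ × ℤ =>
          (if p.1 = 0 then "  " else if PySem.Int.mod p.1 10 = 0 then ",\n  " else ", ")
            ++ PySem.Int.toStr p.2 ++ ": " ++ PySem.Int.toStr (d.getD p.2 0))
        = pvPieceC (fun n => (PySem.Int.toStr n ++ ": " ++ PySem.Int.toStr (d.getD n 0)).toList)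
      from funext fun p => pv_pieceS_toList d p]
    rw [show ("\n".toList) = ['\n'] from rfl, show ("".toList) = ([] : List Char) from rfl]
    rw [pv_join_nil_flatten]
    have hmain := pv_main (fun n => (PySem.Int.toStr n ++ ": " ++ PySem.Int.toStr (d.getD n 0)).toList)
      (pv_goodE d) keys.length keys le_rfl
    unfold pvBodyB pvBodyA at hmain
    rw [← hmain]
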